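-- pv_equiv track=rewrite | github.com/drbothen/hexstrike-ai | src/hexstrike/utils/formatting.py | format_vulnerability_summary
-- ===== SOURCE A (Python) =====
-- def format_vulnerability_summary(vulnerabilities: list) -> str:
--     """Format vulnerability list as summary"""
--     if not vulnerabilities:
--         return "No vulnerabilities found."
--
--     severity_counts = {}
--     for vuln in vulnerabilities:
--         severity = vuln.get('severity', 'unknown').lower()
--         severity_counts[severity] = severity_counts.get(severity, 0) + 1
--
--     summary_lines = [f"Total vulnerabilities: {len(vulnerabilities)}"]
--
--     for severity in ['critical', 'high', 'medium', 'low', 'info', 'unknown']: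
--         count = severity_counts.get(severity, 0)
--         if count > 0:
--             summary_lines.append(f"  {severity.capitalize()}: {count}")
--
--     return "\n".join(summary_lines)
-- ===== SOURCE B (Python) =====
-- _ORDER = ['critical', 'high', 'medium', 'low', 'info', 'unknown']
--
--
-- def format_vulnerability_summary(vulnerabilities: list) -> str:
--     """Format vulnerability list as summary"""
--     if not vulnerabilities:
--         return "No vulnerabilities found."
--
--     # Sort-then-group: map each recognised severity to its rank, sort the
--     # ranks, then one scan over runs of equal ranks yields the lines in
--     # severity order with their counts (unrecognised severities print nothing).
--     ranks = sorted(_ORDER.index(s)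
--                    for s in (v.get('severity', 'unknown').lower()
--                              for v in vulnerabilities)
--                    if s in _ORDER)
--
--     lines = [f"Total vulnerabilities: {len(vulnerabilities)}"]
--     i = 0
--     n = len(ranks)
--     while i < n:
--         j = i
--         while j < n and ranks[j] == ranks[i]:
--             j += 1
--         lines.append(f"  {_ORDER[ranks[i]].capitalize()}: {j - i}")
--         i = j
--     return "\n".join(lines)
-- ===== Notes on version B (the rewrite author's own statement) =====
-- stated objective: alternative
-- what changed: Replaces A's hash-counter pass plus per-severity lookup loop with a sort-then-group algorithm: each vulnerability's severity is mapped to its rank in the fixed order, the ranks are sorted, and one scan over runs of equal ranks emits the lines with their run lengths.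
import Mathlib
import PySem

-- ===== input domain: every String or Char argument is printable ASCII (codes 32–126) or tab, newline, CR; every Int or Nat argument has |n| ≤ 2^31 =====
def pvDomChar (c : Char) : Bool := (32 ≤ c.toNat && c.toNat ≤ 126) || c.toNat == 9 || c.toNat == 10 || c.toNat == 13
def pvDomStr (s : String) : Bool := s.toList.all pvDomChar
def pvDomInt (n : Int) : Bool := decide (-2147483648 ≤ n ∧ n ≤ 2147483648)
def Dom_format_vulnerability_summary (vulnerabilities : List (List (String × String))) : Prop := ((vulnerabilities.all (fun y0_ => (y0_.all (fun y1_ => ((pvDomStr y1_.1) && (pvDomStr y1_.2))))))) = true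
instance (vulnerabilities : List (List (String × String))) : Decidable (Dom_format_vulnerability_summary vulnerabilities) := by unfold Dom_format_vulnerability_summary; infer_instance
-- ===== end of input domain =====

-- B replaces A's hash-counter pass + fixed lookup loop by sort-then-group over severity ranks; objective: alternative.

-- ===== PORT A =====
-- shared helper: Python's `v.get('severity', 'unknown').lower()` (assoc-list lookup = first match)
def pvSevOf (vuln : List (String × String)) : String :=
  PySem.Str.lower ((List.lookup "severity" vuln).getD "unknown")

-- Python str.capitalize(), exact on ASCII input: first char uppercased, rest lowercased
def pvCapitalize (s : String) : String :=
  match s.toList with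
  | [] => ""
  | c :: rest => String.ofList (PySem.Chars.upperChar c :: PySem.Chars.lower rest)

def format_vulnerability_summary (vulnerabilities : List (List (String × String))) : String :=
  if vulnerabilities = [] then "No vulnerabilities found."
  else
    let severity_counts : PySem.Dict String Int :=
      vulnerabilities.foldl
        (fun d vuln => d.insert (pvSevOf vuln) (d.getD (pvSevOf vuln) 0 + 1))
        PySem.Dict.empty
    let summary_lines : List String :=
      ["Total vulnerabilities: " ++ PySem.Int.toStr (PySem.List.len vulnerabilities)]
    let summary_lines :=
      (["critical", "high", "medium", "low", "info", "unknown"] : List String).foldl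
        (fun acc severity =>
          let count := severity_counts.getD severity 0
          if count > 0 then acc ++ ["  " ++ pvCapitalize severity ++ ": " ++ PySem.Int.toStr count]
          else acc)
        summary_lines
    PySem.Str.join "\n" summary_lines

-- ===== PORT B =====
def pvOrder : List String := ["critical", "high", "medium", "low", "info", "unknown"]

-- B's while-loop scan over runs of equal ranks, as the obvious structural
-- recursion: the inner `while ranks[j] == ranks[i]` is the takeWhile/dropWhile
-- split of the tail; `_ORDER[ranks[i]]` is a always-in-range index (ranks come
-- from _ORDER.index), ported as getD.
def pvGroup : List Nat → List String
  | [] => []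
  | r :: t =>
    ("  " ++ pvCapitalize (pvOrder.getD r "") ++ ": "
        ++ PySem.Int.toStr ((1 + (t.takeWhile (· == r)).length : Nat) : Int))
      :: pvGroup (t.dropWhile (· == r))
termination_by l => l.length
decreasing_by
  simp only [List.length_cons]
  exact Nat.lt_succ_of_le (List.length_dropWhile_le _ _)

def format_vulnerability_summary_alt (vulnerabilities : List (List (String × String))) : String :=
  if vulnerabilities = [] then "No vulnerabilities found."
  else
    -- `_ORDER.index(s) for s in … if s in _ORDER` is exactly filterMap with index?
    let ranks : List Nat :=
      PySem.List.sorted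
        (vulnerabilities.filterMap (fun v => PySem.List.index? pvOrder (pvSevOf v)))
        (fun x => x) false
    PySem.Str.join "\n"
      (("Total vulnerabilities: " ++ PySem.Int.toStr (PySem.List.len vulnerabilities))
        :: pvGroup ranks)

-- ===== PRECONDITION & SPEC =====
def Spec_format_vulnerability_summary (vulnerabilities : List (List (String × String))) (out : String) : Prop := out = format_vulnerability_summary_alt vulnerabilities
instance (vulnerabilities : List (List (String × String))) (out : String) : Decidable (Spec_format_vulnerability_summary vulnerabilities out) := by unfold Spec_format_vulnerability_summary; infer_instance

-- ===== CLAIM (what is proved, stated in full; the proofs are below) =====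
def Claim_equal_format_vulnerability_summary : Prop := ∀ (vulnerabilities : List (List (String × String))), Dom_format_vulnerability_summary vulnerabilities → Spec_format_vulnerability_summary vulnerabilities (format_vulnerability_summary vulnerabilities)

-- ===== LEMMAS AND PROOFS =====

def pvLine (r : Nat) (c : Nat) : String :=
  "  " ++ pvCapitalize (pvOrder.getD r "") ++ ": " ++ PySem.Int.toStr (c : Int)

lemma pv_count_filterMap {α β : Type} [DecidableEq β] (f : α → Option β) (l : List α) (b : β) :
    (l.filterMap f).count b = l.countP (fun a => f a == some b) := by
  induction l with
  | nil => simp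
  | cons a t ih =>
    cases h : f a <;>
      simp [h, List.count_cons, List.countP_cons, ih]

-- where `.index` finds each of the six severities
lemma pv_index?_order (s : String) :
    PySem.List.index? pvOrder s =
      if s = "critical" then some 0 else if s = "high" then some 1
      else if s = "medium" then some 2 else if s = "low" then some 3
      else if s = "info" then some 4 else if s = "unknown" then some 5 else none := by
  split_ifs with h1 h2 h3 h4 h5 h6 <;> subst_vars <;> first
    | decide
    | · rw [PySem.List.index?_eq_none_iff]
        simp [pvOrder]
        exact ⟨h1, h2, h3, h4, h5, h6⟩

-- grouping a sorted list of ranks drawn from sevs = one line per present rank, in order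
lemma pv_group_sorted (sevs : List Nat) (l : List Nat)
    (hs : sevs.Pairwise (· < ·)) (hl : l.Pairwise (· ≤ ·)) (hsub : ∀ x ∈ l, x ∈ sevs) :
    pvGroup l = (sevs.filter (fun r => l.count r != 0)).map (fun r => pvLine r (l.count r)) := by
  induction sevs generalizing l with
  | nil =>
    cases l with
    | nil => simp [pvGroup]
    | cons r t => exact absurd (hsub r (by simp)) (by simp)
  | cons s ss ih =>
    cases l with
    | nil => simp [pvGroup]
    | cons r t =>
      have hmin : ∀ x ∈ r :: t, r ≤ x := by
        intro x hx
        rcases List.mem_cons.mp hx with h | h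
        · exact le_of_eq h.symm
        · exact (List.pairwise_cons.mp hl).1 x h
      have hsplit : t = t.takeWhile (· == r) ++ t.dropWhile (· == r) :=
        (List.takeWhile_append_dropWhile).symm
      have hrun : ∀ x ∈ t.takeWhile (· == r), x = r := by
        intro x hx
        simpa using List.mem_takeWhile_imp hx
      have hrest_ne : ∀ x ∈ t.dropWhile (· == r), r < x := by
        cases hd : t.dropWhile (· == r) with
        | nil => intro x hx; simp at hx
        | cons y ys =>
          have hne : t.dropWhile (· == r) ≠ [] := by simp [hd]
          have hyr : y ≠ r := by
            simpa [hd] using List.head_dropWhile_not (· == r) hne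
          have hymem : y ∈ r :: t := by
            rw [List.mem_cons, hsplit, hd]
            right; exact List.mem_append_right _ (by simp)
          have hygt : r < y := lt_of_le_of_ne (hmin y hymem) (fun h => hyr h.symm)
          have hsorted : (y :: ys).Pairwise (· ≤ ·) := by
            rw [← hd]
            exact ((List.pairwise_cons.mp hl).2).sublist (List.dropWhile_sublist _)
          intro x hx
          rcases List.mem_cons.mp hx with h | h
          · exact h ▸ hygt
          · exact lt_of_lt_of_le hygt ((List.pairwise_cons.mp hsorted).1 x h)
      have hcount_r : (r :: t).count r = 1 + (t.takeWhile (· == r)).length := by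
        rw [List.count_cons_self]
        conv_lhs => rw [hsplit]
        rw [List.count_append]
        have h1 : (t.takeWhile (· == r)).count r = (t.takeWhile (· == r)).length :=
          List.count_eq_length.mpr (fun x hx => by simp [hrun x hx])
        have h2 : (t.dropWhile (· == r)).count r = 0 :=
          List.count_eq_zero.mpr (fun hmem => lt_irrefl r (hrest_ne r hmem))
        omega
      have hcount_other : ∀ q, r < q → (r :: t).count q = (t.dropWhile (· == r)).count q := by
        intro q hq
        rw [List.count_cons]
        conv_lhs => rw [hsplit]
        rw [List.count_append]
        have h1 : (t.takeWhile (· == r)).count q = 0 :=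
          List.count_eq_zero.mpr (fun hmem => by have := hrun q hmem; omega)
        have h2 : ¬ (r == q) = true := by simp; omega
        simp [h1, h2]
      by_cases hrs : r = s
      · -- head rank equals the first candidate: peel the run
        subst hrs
        have hrec := ih (t.dropWhile (· == r))
          (List.pairwise_cons.mp hs).2
          (((List.pairwise_cons.mp hl).2).sublist (List.dropWhile_sublist _))
          (by
            intro x hx
            have hx' : x ∈ r :: t := by
              rw [List.mem_cons, hsplit]
              right; exact List.mem_append_right _ hx
            rcases List.mem_cons.mp (hsub x hx') with h | h
            · exact absurd h (by have := hrest_ne x hx; omega)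
            · exact h)
        have hss_counts : ∀ q ∈ ss, (t.dropWhile (· == r)).count q = (r :: t).count q := by
          intro q hq
          exact (hcount_other q ((List.pairwise_cons.mp hs).1 q hq)).symm
        have hfilter_keep : ((r :: t).count r != 0) = true := by
          rw [hcount_r]; simp
        rw [pvGroup, List.filter_cons, if_pos hfilter_keep, List.map_cons]
        congr 1
        · show pvLine r (1 + (t.takeWhile (· == r)).length) = pvLine r ((r :: t).count r)
          rw [hcount_r]
        · rw [hrec]
          have hfeq : ss.filter (fun q => (t.dropWhile (· == r)).count q != 0)
              = ss.filter (fun q => (r :: t).count q != 0) :=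
            List.filter_congr (fun q hq => by rw [hss_counts q hq])
          rw [hfeq]
          apply List.map_congr_left
          intro q hq
          rw [hss_counts q (List.mem_filter.mp hq).1]
      · -- head rank skips the first candidate: s occurs nowhere in l
        have hrs' : r ∈ ss := by
          rcases List.mem_cons.mp (hsub r (by simp)) with h | h
          · exact absurd h hrs
          · exact h
        have hslt : s < r := (List.pairwise_cons.mp hs).1 r hrs'
        have hcount_s : (r :: t).count s = 0 :=
          List.count_eq_zero.mpr (fun hmem => by have := hmin s hmem; omega)
        have hsub' : ∀ x ∈ r :: t, x ∈ ss := by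
          intro x hx
          rcases List.mem_cons.mp (hsub x hx) with h | h
          · exfalso; have := hmin x hx; omega
          · exact h
        have hdrop : ((r :: t).count s != 0) = false := by simp [hcount_s]
        rw [List.filter_cons, if_neg (by simp [hdrop])]
        exact ih (r :: t) (List.pairwise_cons.mp hs).2 hl hsub'

-- A's counter dict read back at key s is the direct count of matching severities
lemma pv_dict_count (vs : List (List (String × String))) (s : String) :
    (vs.foldl (fun d vuln => d.insert (pvSevOf vuln) (d.getD (pvSevOf vuln) 0 + 1))
        PySem.Dict.empty).getD s 0
      = ((vs.countP (fun v => pvSevOf v == s) : Nat) : Int) := by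
  have h1 : vs.foldl (fun d vuln => d.insert (pvSevOf vuln) (d.getD (pvSevOf vuln) 0 + 1))
        (PySem.Dict.empty : PySem.Dict String Int)
      = (vs.map pvSevOf).foldl (fun d x => d.insert x (d.getD x 0 + 1)) PySem.Dict.empty := by
    rw [List.foldl_map]
  rw [h1, PySem.Dict.getD_foldl_insert_add_one, PySem.Dict.getD_empty, zero_add,
    List.count_eq_countP, List.countP_map]
  rfl

-- the multiset of ranks counts each fixed severity exactly
lemma pv_rank_count (vs : List (List (String × String))) (r : Nat)
    (hr : r ∈ ([0, 1, 2, 3, 4, 5] : List Nat)) :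
    (vs.filterMap (fun v => PySem.List.index? pvOrder (pvSevOf v))).count r
      = vs.countP (fun v => pvSevOf v == pvOrder.getD r "") := by
  rw [pv_count_filterMap]
  refine List.countP_congr ?_
  intro v _
  generalize pvSevOf v = s
  rw [pv_index?_order]
  fin_cases hr <;> split_ifs <;> simp_all [pvOrder]

-- ===== VERDICT (by name: the statement is the Claim_ definition above) =====
theorem format_vulnerability_summary_spec : Claim_equal_format_vulnerability_summary := by
  intro vs _
  show _ = _
  by_cases hvs : vs = []
  · simp [format_vulnerability_summary, format_vulnerability_summary_alt, hvs]
  · unfold format_vulnerability_summary format_vulnerability_summary_alt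
    simp only [hvs, if_false]
    congr 1
    -- B's ranks list
    set L : List Nat := vs.filterMap (fun v => PySem.List.index? pvOrder (pvSevOf v)) with hL
    have hperm : (PySem.List.sorted L (fun x => x) false).Perm L := PySem.List.sorted_perm _ _ _
    have hc : ∀ r : Nat, (PySem.List.sorted L (fun x => x) false).count r = L.count r :=
      fun r => hperm.count_eq r
    have hgroup : pvGroup (PySem.List.sorted L (fun x => x) false)
        = (([0, 1, 2, 3, 4, 5] : List Nat).filter (fun r => L.count r != 0)).map
            (fun r => pvLine r (L.count r)) := by
      rw [pv_group_sorted ([0, 1, 2, 3, 4, 5] : List Nat) _ (by decide)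
        (by simpa using PySem.List.sorted_pairwise L (fun x => x))
        (by
          intro x hx
          rw [PySem.List.mem_sorted] at hx
          rcases List.mem_filterMap.mp hx with ⟨v, _, hv⟩
          obtain ⟨hk, -, -⟩ := PySem.List.getElem_of_index?_eq_some hv
          have : x < 6 := by simpa [pvOrder] using hk
          simp only [List.mem_cons, List.not_mem_nil, or_false]
          omega)]
      simp only [hc]
    rw [hgroup]
    -- A's loop over the six severity strings is append-if = filter-then-map
    rw [PySem.List.foldl_append_ite]
    -- the six severity strings are the ranks mapped through pvOrder
    have hmap : (["critical", "high", "medium", "low", "info", "unknown"] : List String)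
        = ([0, 1, 2, 3, 4, 5] : List Nat).map (fun r => pvOrder.getD r "") := by decide
    rw [hmap, List.filter_map, List.map_map, List.singleton_append]
    congr 1
    have hcnt : ∀ r ∈ ([0, 1, 2, 3, 4, 5] : List Nat),
        (vs.foldl (fun d vuln => d.insert (pvSevOf vuln) (d.getD (pvSevOf vuln) 0 + 1))
          (PySem.Dict.empty : PySem.Dict String Int)).getD (pvOrder.getD r "") 0
          = ((L.count r : Nat) : Int) := by
      intro r hr
      rw [pv_dict_count, hL, pv_rank_count vs r hr]
    have hfilt : (([0, 1, 2, 3, 4, 5] : List Nat).filter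
          ((fun x => decide ((vs.foldl (fun d vuln => d.insert (pvSevOf vuln) (d.getD (pvSevOf vuln) 0 + 1))
            (PySem.Dict.empty : PySem.Dict String Int)).getD x 0 > 0)) ∘ fun r => pvOrder.getD r ""))
        = (([0, 1, 2, 3, 4, 5] : List Nat).filter (fun r => L.count r != 0)) := by
      refine List.filter_congr (fun r hr => ?_)
      simp only [Function.comp_apply]
      rw [hcnt r hr]
      cases hn : L.count r <;> simp
    rw [hfilt]
    refine List.map_congr_left (fun r hr => ?_)
    simp only [Function.comp_apply]
    rw [hcnt r (List.mem_filter.mp hr).1]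
    rfl
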